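-- pv_equiv track=rewrite | github.com/MrFishPL/sdft-experiments | sdft/trainers/sft_small_data.py | _contains_line_block
-- ===== SOURCE A (Python) =====
-- def _contains_line_block(haystack: list[str], needle: list[str]) -> bool:
--     if not needle or len(needle) > len(haystack):
--         return False
--     block_len = len(needle)
--     for start in range(0, len(haystack) - block_len + 1):
--         if haystack[start : start + block_len] == needle:
--             return True
--     return False
-- ===== SOURCE B (Python) =====
-- def _contains_line_block(haystack: list[str], needle: list[str]) -> bool:
--     if not needle:
--         return False
--     n = len(haystack)
--     m = len(needle)
--     i = 0
--     j = 0
--     while i < n: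
--         if haystack[i] == needle[j]:
--             i += 1
--             j += 1
--             if j == m:
--                 return True
--         else:
--             i = i - j + 1
--             j = 0
--     return False
-- ===== Notes on version B (the rewrite author's own statement) =====
-- stated objective: alternative
-- what changed: replaced the slice-and-compare scan over every start index with a single two-pointer scan with backtracking (two cursors over haystack and needle, no slicing, O(1) extra space)
import Mathlib
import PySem

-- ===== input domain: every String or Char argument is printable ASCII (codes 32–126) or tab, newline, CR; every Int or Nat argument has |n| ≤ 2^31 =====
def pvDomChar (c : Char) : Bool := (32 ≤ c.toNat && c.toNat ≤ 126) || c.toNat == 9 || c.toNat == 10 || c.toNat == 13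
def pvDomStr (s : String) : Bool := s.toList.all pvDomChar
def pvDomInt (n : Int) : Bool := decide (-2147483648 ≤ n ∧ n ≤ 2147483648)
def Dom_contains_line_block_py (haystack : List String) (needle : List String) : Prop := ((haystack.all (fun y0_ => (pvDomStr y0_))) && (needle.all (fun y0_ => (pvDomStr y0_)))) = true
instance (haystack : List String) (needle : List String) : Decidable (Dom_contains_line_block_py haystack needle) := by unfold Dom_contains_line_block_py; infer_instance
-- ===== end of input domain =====

-- B replaces A's slice-per-start scan by a single two-pointer scan with backtracking (alternative structure, same worst-case cost).

-- ===== PORT A =====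
def contains_line_block_py (haystack : List String) (needle : List String) : Bool :=
  if needle.isEmpty || decide (needle.length > haystack.length) then false
  else
    let blockLen := needle.length
    -- 'for start in range(...): if ... == needle: return True' / fall-through 'return False' is .any
    (PySem.List.pyRange 0 ((haystack.length : Int) - blockLen + 1) 1).any
      (fun start => PySem.List.slice haystack (some start) (some (start + blockLen)) == needle)

-- ===== PORT B =====
-- the while loop of Source B; haystack[i] / needle[j] ported as getD (exact: the loop only reads
-- i < len(haystack) — checked by the loop guard — and j < len(needle), an invariant of the loop)
def altLoop (haystack : List String) (needle : List String) (i j : Nat) : Bool :=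
  if _h : i < haystack.length then
    if haystack.getD i "" == needle.getD j "" then
      if j + 1 == needle.length then true
      else altLoop haystack needle (i + 1) (j + 1)
    else altLoop haystack needle (i - j + 1) 0
  else false
termination_by (haystack.length + 1 - (i - j), haystack.length - i)
decreasing_by
  · exact Prod.Lex.right' _ (by omega) (by omega)
  · exact Prod.Lex.left _ _ (by omega)

def contains_line_block_py_alt (haystack : List String) (needle : List String) : Bool :=
  if needle.isEmpty then false
  else altLoop haystack needle 0 0

-- ===== PRECONDITION & SPEC =====
def Spec_contains_line_block_py (haystack : List String) (needle : List String) (out : Bool) : Prop := out = contains_line_block_py_alt haystack needle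
instance (haystack : List String) (needle : List String) (out : Bool) : Decidable (Spec_contains_line_block_py haystack needle out) := by unfold Spec_contains_line_block_py; infer_instance

-- ===== CLAIM (what is proved, stated in full; the proofs are below) =====
def Claim_equal_contains_line_block_py : Prop := ∀ (haystack : List String) (needle : List String), Dom_contains_line_block_py haystack needle → Spec_contains_line_block_py haystack needle (contains_line_block_py haystack needle)

-- ===== LEMMAS AND PROOFS =====

-- an occurrence of the needle at start s
def Occ (haystack : List String) (needle : List String) (s : Nat) : Prop :=
  s + needle.length ≤ haystack.length ∧ (haystack.drop s).take needle.length = needle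

lemma A_iff (haystack needle : List String) (hne : needle ≠ []) :
    contains_line_block_py haystack needle = true ↔ ∃ s, Occ haystack needle s := by
  by_cases hlen : needle.length ≤ haystack.length
  · have hguard : (needle.isEmpty || decide (needle.length > haystack.length)) = false := by
      simp [hne]; omega
    rw [contains_line_block_py]
    simp only [hguard, Bool.false_eq_true, if_false, List.any_eq_true]
    constructor
    · rintro ⟨x, hx, hp⟩
      rw [PySem.List.mem_pyRange_one] at hx
      obtain ⟨hx0, hxlt⟩ := hx
      lift x to Nat using hx0 with s
      rw [PySem.List.slice_natCast_add, beq_iff_eq] at hp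
      exact ⟨s, by omega, hp⟩
    · rintro ⟨s, hs1, hs2⟩
      refine ⟨(s : Int), ?_, ?_⟩
      · rw [PySem.List.mem_pyRange_one]
        constructor <;> omega
      · rw [PySem.List.slice_natCast_add, beq_iff_eq]
        exact hs2
  · have hguard : (needle.isEmpty || decide (needle.length > haystack.length)) = true := by
      simp; omega
    rw [contains_line_block_py]
    simp only [hguard, if_true]
    constructor
    · intro h; exact absurd h (by simp)
    · rintro ⟨s, hs1, _⟩; omega

-- one matching step: the partial match of length j extends by the element haystack[i]
lemma inv_step (haystack needle : List String) (i j : Nat)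
    (hj : j < needle.length) (hji : j ≤ i) (hilt : i < haystack.length)
    (hinv : (haystack.drop (i - j)).take j = needle.take j)
    (heq : haystack.getD i "" = needle.getD j "") :
    (haystack.drop (i - j)).take (j + 1) = needle.take (j + 1) := by
  rw [List.take_add_one, List.take_add_one, hinv]
  congr 1
  rw [List.getElem?_drop]
  have h1 : i - j + j = i := by omega
  rw [h1]
  rw [List.getD_eq_getElem?_getD, List.getD_eq_getElem?_getD,
      List.getElem?_eq_getElem hilt, List.getElem?_eq_getElem hj] at heq
  rw [List.getElem?_eq_getElem hilt, List.getElem?_eq_getElem hj]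
  simpa using heq

lemma loop_iff (haystack needle : List String) (i j : Nat)
    (hj : j < needle.length) (hji : j ≤ i) (hi : i ≤ haystack.length)
    (hinv : (haystack.drop (i - j)).take j = needle.take j) :
    altLoop haystack needle i j = true ↔ ∃ s, i - j ≤ s ∧ Occ haystack needle s := by
  induction i, j using altLoop.induct haystack needle with
  | case1 i j hilt heq hdone =>
    rw [altLoop, dif_pos hilt, if_pos heq, if_pos hdone]
    simp only [true_iff]
    refine ⟨i - j, le_refl _, ?_, ?_⟩
    · have : j + 1 = needle.length := by simpa using hdone
      omega
    · have hm : j + 1 = needle.length := by simpa using hdone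
      have hext := inv_step haystack needle i j hj hji hilt hinv (by simpa using heq)
      rw [hm] at hext
      rw [hext, List.take_of_length_le (le_refl _)]
  | case2 i j hilt heq hdone ih =>
    rw [altLoop, dif_pos hilt, if_pos heq, if_neg hdone]
    have hm : j + 1 ≠ needle.length := by
      intro h; rw [← h] at hdone; simp at hdone
    have hext := inv_step haystack needle i j hj hji hilt hinv (by simpa using heq)
    have h1 : i + 1 - (j + 1) = i - j := by omega
    have := ih (by omega) (by omega) (by omega) (by rw [h1]; exact hext)
    rw [this]
    constructor <;> (rintro ⟨s, hs, ho⟩; exact ⟨s, by omega, ho⟩)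
  | case3 i j hilt heq ih =>
    rw [altLoop, dif_pos hilt, if_neg heq]
    have hne : haystack.getD i "" ≠ needle.getD j "" := by simpa using heq
    have hnocc : ¬ Occ haystack needle (i - j) := by
      rintro ⟨_, hocc⟩
      apply hne
      have hij : i - j + j = i := by omega
      have : needle[j]? = haystack[i]? := by
        conv_lhs => rw [← hocc]
        rw [List.getElem?_take_of_lt hj, List.getElem?_drop, hij]
      rw [List.getD_eq_getElem?_getD, List.getD_eq_getElem?_getD, this]
    have := ih (by omega) (by omega) (by omega) (by simp)
    rw [this]
    constructor
    · rintro ⟨s, hs, ho⟩; exact ⟨s, by omega, ho⟩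
    · rintro ⟨s, hs, ho⟩
      refine ⟨s, ?_, ho⟩
      rcases Nat.lt_or_ge s (i - j + 1) with hlt | hge
      · have : s = i - j := by omega
        exact absurd (this ▸ ho) hnocc
      · omega
  | case4 i j hge =>
    rw [altLoop, dif_neg hge]
    simp only [Bool.false_eq_true, false_iff]
    rintro ⟨s, hs, hlen, _⟩
    omega

lemma B_iff (haystack needle : List String) (hne : needle ≠ []) :
    contains_line_block_py_alt haystack needle = true ↔ ∃ s, Occ haystack needle s := by
  rw [contains_line_block_py_alt]
  have : needle.isEmpty = false := by simpa [List.isEmpty_iff] using hne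
  simp only [this, Bool.false_eq_true, if_false]
  rw [loop_iff haystack needle 0 0 (List.length_pos_of_ne_nil hne) (le_refl _)
      (Nat.zero_le _) (by simp)]
  simp

-- ===== VERDICT (by name: the statement is the Claim_ definition above) =====
theorem contains_line_block_py_spec : Claim_equal_contains_line_block_py := by
  intro haystack needle _
  unfold Spec_contains_line_block_py
  by_cases hne : needle = []
  · subst hne
    simp [contains_line_block_py, contains_line_block_py_alt]
  · have := (A_iff haystack needle hne).trans (B_iff haystack needle hne).symm
    exact Bool.coe_iff_coe.mp this
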